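-- pv_equiv track=rewrite | github.com/Augus1999/mol2chemfigPy3 | mol2chemfigPy3/chemfig_mappings.py | strip_output
-- ===== SOURCE A (Python) =====
-- from typing import Union, Optional, List, Tuple, Dict
--
-- TERSE_LINE_WIDTH = 75  # in terse code format, force linebreaks
--
-- def strip_output(output_list: List) -> List:
--     """
--     remove white space and comments
--
--     :param output_list: [...]
--     :return: modified output_list
--     """
--     stripped = []
--
--     for line in output_list:
--         stripped.append(line.split("%")[0].strip())
--
--     stripped.reverse()
--
--     chunked = []
--
--     acc = ""
--
--     while stripped:
--         popped = stripped.pop()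
--         if len(acc) + len(popped) > TERSE_LINE_WIDTH:
--             chunked.append(acc)
--             acc = popped
--         else:
--             acc += popped
--     if acc:
--         chunked.append(acc)
--
--     return chunked
-- ===== SOURCE B (Python) =====
-- TERSE_LINE_WIDTH = 75
--
--
-- def strip_output(output_list):
--     """Single forward pass: strip each line inline and greedily pack into
--     width-limited chunks, with a trailing flush. No intermediate stripped
--     list and no reverse/pop stack."""
--     chunked = []
--     acc = ""
--     for line in output_list:
--         s = line.split("%")[0].strip()
--         if len(acc) + len(s) > TERSE_LINE_WIDTH:
--             chunked.append(acc)
--             acc = s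
--         else:
--             acc += s
--     if acc:
--         chunked.append(acc)
--     return chunked
-- ===== Notes on version B (the rewrite author's own statement) =====
-- stated objective: simpler
-- what changed: Fused A's two passes (build stripped list, reverse it, drain it as a while-pop stack) into one forward loop that strips each line inline and packs it greedily, eliminating the intermediate list and the reverse/pop machinery.
import Mathlib
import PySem

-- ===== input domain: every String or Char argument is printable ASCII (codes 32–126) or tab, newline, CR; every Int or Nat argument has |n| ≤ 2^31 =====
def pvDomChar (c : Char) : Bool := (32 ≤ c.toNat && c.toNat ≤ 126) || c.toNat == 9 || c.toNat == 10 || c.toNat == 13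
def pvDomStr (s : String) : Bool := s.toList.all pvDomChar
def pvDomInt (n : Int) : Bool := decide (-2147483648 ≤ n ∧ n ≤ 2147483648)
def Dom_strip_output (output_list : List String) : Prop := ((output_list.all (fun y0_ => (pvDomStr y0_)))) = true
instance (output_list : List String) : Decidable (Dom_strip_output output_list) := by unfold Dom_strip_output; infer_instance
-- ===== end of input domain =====

-- B fuses A's two passes into one forward strip-and-pack loop (objective: simpler).

-- ===== PORT A =====
-- line.split("%")[0].strip(); split always returns a nonempty list, so headD's default is never used
def pvStripLineA (line : String) : String :=
  PySem.Str.strip ((((PySem.Str.split? line "%").getD []).headD ""))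

-- the while-pop loop of A: `stripped` is the (already reversed) stack, pop() takes the last element
def pvLoopA (stripped : List String) (acc : String) (chunked : List String) : List String :=
  if h : stripped = [] then
    if acc ≠ "" then chunked ++ [acc] else chunked
  else
    let popped := stripped.getLast h
    let rest := stripped.dropLast
    if PySem.Str.len acc + PySem.Str.len popped > 75 then
      pvLoopA rest popped (chunked ++ [acc])
    else
      pvLoopA rest (acc ++ popped) chunked
termination_by stripped.length
decreasing_by
  all_goals
    simp only [List.length_dropLast]
    have : stripped.length ≠ 0 := by simp [h]
    omega

def strip_output (output_list : List String) : List String :=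
  let stripped := output_list.map pvStripLineA
  pvLoopA stripped.reverse "" []

-- ===== PORT B =====
def strip_output_alt (output_list : List String) : List String :=
  let st := output_list.foldl
    (fun (st : List String × String) line =>
      let s := PySem.Str.strip ((((PySem.Str.split? line "%").getD []).headD ""))
      if PySem.Str.len st.2 + PySem.Str.len s > 75 then (st.1 ++ [st.2], s)
      else (st.1, st.2 ++ s))
    ([], "")
  if st.2 ≠ "" then st.1 ++ [st.2] else st.1

-- ===== PRECONDITION & SPEC =====
def Spec_strip_output (output_list : List String) (out : List String) : Prop := out = strip_output_alt output_list
instance (output_list : List String) (out : List String) : Decidable (Spec_strip_output output_list out) := by unfold Spec_strip_output; infer_instance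

-- ===== CLAIM (what is proved, stated in full; the proofs are below) =====
def Claim_equal_strip_output : Prop := ∀ (output_list : List String), Dom_strip_output output_list → Spec_strip_output output_list (strip_output output_list)

-- ===== LEMMAS AND PROOFS =====

-- B's packing step on an already-stripped line
def pvStepB (st : List String × String) (s : String) : List String × String :=
  if PySem.Str.len st.2 + PySem.Str.len s > 75 then (st.1 ++ [st.2], s) else (st.1, st.2 ++ s)

-- A's stack loop on the reversed list is B's forward fold followed by the trailing flush
theorem pvLoopA_eq_foldl (l : List String) (acc : String) (chunked : List String) :
    pvLoopA l.reverse acc chunked =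
      (let st := l.foldl pvStepB (chunked, acc)
       if st.2 ≠ "" then st.1 ++ [st.2] else st.1) := by
  induction l generalizing acc chunked with
  | nil => rw [pvLoopA]; simp
  | cons x xs ih =>
    rw [List.reverse_cons, pvLoopA]
    have hne : xs.reverse ++ [x] ≠ [] := by simp
    simp only [dif_neg hne, List.getLast_append_singleton, List.dropLast_concat]
    simp only [List.foldl_cons, pvStepB]
    by_cases hc : PySem.Str.len acc + PySem.Str.len x > 75
    · rw [if_pos hc, if_pos hc, ih]
    · rw [if_neg hc, if_neg hc, ih]

-- ===== VERDICT (by name: the statement is the Claim_ definition above) =====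
theorem strip_output_spec : Claim_equal_strip_output := by
  intro output_list _
  show strip_output output_list = strip_output_alt output_list
  unfold strip_output strip_output_alt
  rw [pvLoopA_eq_foldl]
  simp only [List.foldl_map]
  rfl
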